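-- pv_equiv track=rewrite | github.com/BarracudaPff/code-golf-data-python | codereview/engine.py | SplitPatch
-- ===== SOURCE A (Python) =====
-- def SplitPatch(data):
-- 	"""Splits a patch into separate pieces for each file.
--   Args:
--     data: A string containing the output of svn diff.
--   Returns:
--     A list of 2-tuple (filename, text) where text is the svn diff output
--       pertaining to filename.
--   """
-- 	patches = []
-- 	filename = None
-- 	diff = []
-- 	for line in data.splitlines(True):
-- 		new_filename = None
-- 		if line.startswith("Index:"):
-- 			_, new_filename = line.split(":", 1)
-- 			new_filename = new_filename.strip()
-- 		elif line.startswith("Property changes on:"):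
-- 			_, temp_filename = line.split(":", 1)
-- 			temp_filename = temp_filename.strip().replace("\\", "/")
-- 			if temp_filename != filename:
-- 				new_filename = temp_filename
-- 		if new_filename:
-- 			if filename and diff:
-- 				patches.append((filename, "".join(diff)))
-- 			filename = new_filename
-- 			diff = [line]
-- 			continue
-- 		if diff is not None:
-- 			diff.append(line)
-- 	if filename and diff:
-- 		patches.append((filename, "".join(diff)))
-- 	return patches
-- ===== SOURCE B (Python) =====
-- def SplitPatch(data):
--     """Splits a patch into separate pieces for each file.
--
--     Two-pass version: first record the boundary line indices (with their
--     filenames), then slice the line list between consecutive boundaries.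
--     """
--     lines = data.splitlines(True)
--     boundaries = []
--     current = None
--     for i, line in enumerate(lines):
--         name = None
--         if line.startswith("Index:"):
--             name = line.split(":", 1)[1].strip()
--         elif line.startswith("Property changes on:"):
--             t = line.split(":", 1)[1].strip().replace("\\", "/")
--             if t != current:
--                 name = t
--         if name:
--             boundaries.append((i, name))
--             current = name
--     ends = [i for i, _ in boundaries[1:]] + [len(lines)]
--     return [(name, "".join(lines[i:end]))
--             for (i, name), end in zip(boundaries, ends)]
-- ===== Notes on version B (the rewrite author's own statement) =====
-- stated objective: alternative
-- what changed: Replaces A's single-pass accumulator state machine (current filename + growing diff buffer, emitted on the fly) by a two-pass index-then-slice decomposition: pass one records only the boundary line indices with their filenames, pass two slices the line list between consecutive boundaries and joins each slice.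
import Mathlib
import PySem

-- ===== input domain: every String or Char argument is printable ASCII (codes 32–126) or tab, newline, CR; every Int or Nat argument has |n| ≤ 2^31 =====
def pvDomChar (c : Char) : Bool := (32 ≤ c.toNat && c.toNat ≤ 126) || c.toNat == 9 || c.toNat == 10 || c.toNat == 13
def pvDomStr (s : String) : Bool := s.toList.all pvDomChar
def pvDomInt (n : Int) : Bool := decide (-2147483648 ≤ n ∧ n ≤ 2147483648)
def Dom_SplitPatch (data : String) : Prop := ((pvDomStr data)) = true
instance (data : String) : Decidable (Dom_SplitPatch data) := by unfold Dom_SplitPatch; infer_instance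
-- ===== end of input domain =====

-- B replaces A's single-pass state machine by a boundary-index pass followed by slicing; same values, no speed claim.

-- shared primitive: data.splitlines(True) (keepends). PySem.Str.splitlines drops the line ends,
-- so this is ported by hand; exact on the stated ASCII domain, where the only line breaks are '\n', '\r', '\r\n'.
def pvSplitlinesKeep : List Char → List (List Char)
  | [] => []
  | '\r' :: '\n' :: rest => ['\r', '\n'] :: pvSplitlinesKeep rest
  | c :: cs =>
    if c = '\n' then ['\n'] :: pvSplitlinesKeep cs
    else if c = '\r' then ['\r'] :: pvSplitlinesKeep cs
    else
      match pvSplitlinesKeep cs with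
      | [] => [[c]]
      | l :: ls => (c :: l) :: ls

def pvLines (data : String) : List String :=
  (pvSplitlinesKeep data.toList).map (fun cs => String.ofList cs)

-- shared: line.split(":", 1)[1] (the callers guarantee the line contains ':', so index 1 exists; "" is unreachable)
def pvAfterColon (line : String) : String :=
  (((PySem.Str.splitMax? line ":" 1).getD []).getD 1 "")

-- shared: the 'if line.startswith("Index:") … elif line.startswith("Property changes on:") …' chain of both Pythons
def pvRawName (filename : Option String) (line : String) : Option String :=
  if PySem.Str.startswith line "Index:" then
    some (PySem.Str.strip (pvAfterColon line))
  else if PySem.Str.startswith line "Property changes on:" then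
    let t := PySem.Str.replace (PySem.Str.strip (pvAfterColon line)) "\\" "/"
    if filename ≠ some t then some t else none
  else none

-- Python truthiness of the Optional[str] filename
def pvTruthy : Option String → Bool
  | some s => s ≠ ""
  | none => false

-- ===== PORT A =====
def SplitPatch (data : String) : List (String × String) :=
  let st := (pvLines data).foldl
    (fun (st : List (String × String) × Option String × List String) line =>
      let patches := st.1; let filename := st.2.1; let diff := st.2.2
      match pvRawName filename line with
      | some n =>
        if n ≠ "" then   -- 'if new_filename:'
          ((if pvTruthy filename && !diff.isEmpty then
              patches ++ [(filename.getD "", PySem.Str.join "" diff)]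
            else patches), some n, [line])
        else (patches, filename, diff ++ [line])
      | none => (patches, filename, diff ++ [line]))
    ([], none, [])
  if pvTruthy st.2.1 && !st.2.2.isEmpty then
    st.1 ++ [(st.2.1.getD "", PySem.Str.join "" st.2.2)]
  else st.1

-- ===== PORT B =====
def SplitPatch_alt (data : String) : List (String × String) :=
  let lines := pvLines data
  let st := (PySem.List.enumerate lines).foldl
    (fun (st : List (Int × String) × Option String) p =>
      match pvRawName st.2 p.2 with
      | some n => if n ≠ "" then (st.1 ++ [(p.1, n)], some n) else st
      | none => st)
    ([], none)
  let bs := st.1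
  let ends := (PySem.List.slice bs (some 1) none).map Prod.fst ++ [(lines.length : Int)]
  (bs.zip ends).map (fun pe =>
    (pe.1.2, PySem.Str.join "" (PySem.List.slice lines (some pe.1.1) (some pe.2))))

-- ===== PRECONDITION & SPEC =====
def Spec_SplitPatch (data : String) (out : List (String × String)) : Prop := out = SplitPatch_alt data
instance (data : String) (out : List (String × String)) : Decidable (Spec_SplitPatch data out) := by unfold Spec_SplitPatch; infer_instance

-- ===== CLAIM (what is proved, stated in full; the proofs are below) =====
def Claim_equal_SplitPatch : Prop := ∀ (data : String), Dom_SplitPatch data → Spec_SplitPatch data (SplitPatch data)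

-- ===== LEMMAS AND PROOFS =====

-- boundary test: raw name filtered through Python's truthiness
def pvBoundaryName (filename : Option String) (line : String) : Option String :=
  match pvRawName filename line with
  | some n => if n = "" then none else some n
  | none => none

theorem pvBoundaryName_ne_empty {f : Option String} {l n : String}
    (h : pvBoundaryName f l = some n) : n ≠ "" := by
  unfold pvBoundaryName at h
  cases hr : pvRawName f l with
  | none => simp [hr] at h
  | some m =>
    simp only [hr] at h
    by_cases hm : m = ""
    · simp [hm] at h
    · simp [hm] at h; subst h; exact hm

-- longest prefix with no boundary (w.r.t. the current filename), and the rest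
def pvChop (f : Option String) : List String → List String × List String
  | [] => ([], [])
  | l :: ls =>
    match pvBoundaryName f l with
    | some _ => ([], l :: ls)
    | none => let p := pvChop f ls; (l :: p.1, p.2)

theorem pvChop_append (f : Option String) (ls : List String) :
    (pvChop f ls).1 ++ (pvChop f ls).2 = ls := by
  induction ls with
  | nil => rfl
  | cons l ls ih =>
    unfold pvChop
    cases h : pvBoundaryName f l <;> simp [h, ih]

theorem pvChop_snd_len (f : Option String) (ls : List String) :
    (pvChop f ls).2.length ≤ ls.length := by
  induction ls with
  | nil => simp [pvChop]
  | cons l ls ih =>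
    unfold pvChop
    cases h : pvBoundaryName f l <;> simp [h]
    omega

-- the common specification: groups of lines, one per boundary
def pvSpec (f : Option String) : List String → List (String × String)
  | [] => []
  | l :: ls =>
    match pvBoundaryName f l with
    | some n =>
      (n, PySem.Str.join "" (l :: (pvChop (some n) ls).1)) :: pvSpec (some n) (pvChop (some n) ls).2
    | none => pvSpec f ls
termination_by ls => ls.length
decreasing_by
  · exact Nat.lt_succ_of_le (pvChop_snd_len _ _)
  · simp

theorem pvSpec_chop (f : Option String) (ls : List String) :
    pvSpec f (pvChop f ls).2 = pvSpec f ls := by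
  induction ls with
  | nil => rfl
  | cons l ls ih =>
    unfold pvChop
    cases h : pvBoundaryName f l with
    | some n => simp
    | none => simp only; rw [ih]; conv_rhs => rw [pvSpec]; rw [h]

def pvEmit (f : Option String) (d : List String) : List (String × String) :=
  if pvTruthy f && !d.isEmpty then [(f.getD "", PySem.Str.join "" d)] else []

-- A's loop body, rewritten through pvBoundaryName
def pvStepA (st : List (String × String) × Option String × List String) (line : String) :
    List (String × String) × Option String × List String :=
  match pvBoundaryName st.2.1 line with
  | some n => (st.1 ++ pvEmit st.2.1 st.2.2, some n, [line])
  | none => (st.1, st.2.1, st.2.2 ++ [line])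

theorem stepA_eq (st : List (String × String) × Option String × List String) (line : String) :
    (fun (st : List (String × String) × Option String × List String) line =>
      let patches := st.1; let filename := st.2.1; let diff := st.2.2
      match pvRawName filename line with
      | some n =>
        if n ≠ "" then
          ((if pvTruthy filename && !diff.isEmpty then
              patches ++ [(filename.getD "", PySem.Str.join "" diff)]
            else patches), some n, [line])
        else (patches, filename, diff ++ [line])
      | none => (patches, filename, diff ++ [line])) st line = pvStepA st line := by
  unfold pvStepA pvBoundaryName pvEmit
  cases h : pvRawName st.2.1 line with
  | none => simp [h]
  | some n =>
    by_cases hn : n = "" <;> simp [h, hn]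
    split <;> simp

-- main A-side lemma
theorem runA (ls : List String) : ∀ (f : Option String) (d : List String) (P : List (String × String)),
    (let st := ls.foldl pvStepA (P, f, d);
     if pvTruthy st.2.1 && !st.2.2.isEmpty then
       st.1 ++ [(st.2.1.getD "", PySem.Str.join "" st.2.2)]
     else st.1)
    = P ++ pvEmit f (d ++ (pvChop f ls).1) ++ pvSpec f (pvChop f ls).2 := by
  induction ls with
  | nil =>
    intro f d P
    simp only [List.foldl_nil, pvChop, pvSpec, pvEmit, List.append_nil]
    split <;> simp
  | cons l ls ih =>
    intro f d P
    simp only [List.foldl_cons]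
    unfold pvChop
    cases h : pvBoundaryName f l with
    | some n =>
      have hn : n ≠ "" := pvBoundaryName_ne_empty h
      simp only [pvStepA, h]
      rw [ih (some n) [l] (P ++ pvEmit f d)]
      have he : pvEmit (some n) ([l] ++ (pvChop (some n) ls).1)
          = [(n, PySem.Str.join "" (l :: (pvChop (some n) ls).1))] := by
        simp [pvEmit, pvTruthy, hn]
      rw [he]
      conv_rhs => rw [pvSpec]
      simp [h, pvEmit]
    | none =>
      simp only [pvStepA, h]
      rw [ih f (d ++ [l]) P]
      simp [h]

-- B side: the boundary list as a recursion
def pvBnds (f : Option String) (i : Int) : List String → List (Int × String)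
  | [] => []
  | l :: ls =>
    match pvBoundaryName f l with
    | some n => (i, n) :: pvBnds (some n) (i + 1) ls
    | none => pvBnds f (i + 1) ls

theorem foldB_eq (ls : List String) : ∀ (i : Int) (acc : List (Int × String)) (f : Option String),
    ((PySem.List.enumerate ls i).foldl
      (fun (st : List (Int × String) × Option String) p =>
        match pvRawName st.2 p.2 with
        | some n => if n ≠ "" then (st.1 ++ [(p.1, n)], some n) else st
        | none => st)
      (acc, f)).1 = acc ++ pvBnds f i ls := by
  induction ls with
  | nil => intro i acc f; simp [PySem.List.enumerate_nil, pvBnds]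
  | cons l ls ih =>
    intro i acc f
    rw [PySem.List.enumerate_cons, List.foldl_cons]
    unfold pvBnds
    cases h : pvBoundaryName f l with
    | some n =>
      have hn : n ≠ "" := pvBoundaryName_ne_empty h
      have hr : pvRawName f l = some n := by
        unfold pvBoundaryName at h
        cases hr : pvRawName f l with
        | none => simp [hr] at h
        | some m =>
          simp only [hr] at h
          by_cases hm : m = "" <;> simp [hm] at h <;> simp [h]
      simp only [hr, hn, if_pos, ne_eq, not_false_iff, if_true]
      rw [ih (i + 1) (acc ++ [(i, n)]) (some n)]
      simp
    | none =>
      unfold pvBoundaryName at h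
      cases hr : pvRawName f l with
      | none => simp only [hr]; exact ih (i + 1) acc f
      | some m =>
        simp only [hr] at h
        by_cases hm : m = "" <;> simp [hm] at h
        · simp only [hr, hm]; simp only [ne_eq, not_true_eq_false, if_false]
          exact ih (i + 1) acc f

-- first boundary index in pvBnds, against pvChop
theorem pvBnds_head (ls : List String) : ∀ (f : Option String) (j : Nat),
    (pvBnds f (j : Int) ls).head?.map Prod.fst
      = if (pvChop f ls).2.isEmpty then none
        else some ((j + (pvChop f ls).1.length : Nat) : Int) := by
  induction ls with
  | nil => intro f j; simp [pvBnds, pvChop]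
  | cons l ls ih =>
    intro f j
    unfold pvBnds pvChop
    cases h : pvBoundaryName f l with
    | some n => simp [h]
    | none =>
      simp only [h]
      have : ((j : Int) + 1) = ((j + 1 : Nat) : Int) := by push_cast; ring
      rw [this, ih f (j + 1)]
      cases he : (pvChop f ls).2.isEmpty <;> simp [he]
      push_cast; ring

theorem pvBnds_nil_iff (ls : List String) : ∀ (f : Option String) (j : Int),
    (pvBnds f j ls = [] ↔ (pvChop f ls).2 = []) := by
  induction ls with
  | nil => intro f j; simp [pvBnds, pvChop]
  | cons l ls ih =>
    intro f j
    unfold pvBnds pvChop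
    cases h : pvBoundaryName f l with
    | some n => simp [h]
    | none => simp only [h]; exact ih f (j + 1)

-- B's zip/ends construction as a recursion
def pvRender (L : List String) : List (Int × String) → List (String × String)
  | [] => []
  | (i, n) :: rest =>
    (n, PySem.Str.join "" (PySem.List.slice L (some i)
        (some (match rest with | [] => (L.length : Int) | (j, _) :: _ => j)))) :: pvRender L rest

theorem pvRender_cons (L : List String) (i : Int) (n : String) (rest : List (Int × String)) :
    pvRender L ((i, n) :: rest)
    = (n, PySem.Str.join "" (PySem.List.slice L (some i)
        (some (match rest with | [] => (L.length : Int) | (j, _) :: _ => j)))) :: pvRender L rest := rfl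

theorem zip_ends_eq_render (L : List String) (bs : List (Int × String)) :
    (bs.zip ((PySem.List.slice bs (some 1) none).map Prod.fst ++ [(L.length : Int)])).map
      (fun pe => (pe.1.2, PySem.Str.join "" (PySem.List.slice L (some pe.1.1) (some pe.2))))
    = pvRender L bs := by
  induction bs with
  | nil => simp [pvRender]
  | cons b rest ih =>
    rw [PySem.List.slice_from_one] at *
    cases rest with
    | nil => simp [pvRender]
    | cons b' rest' =>
      obtain ⟨i, n⟩ := b
      simp only [List.tail_cons] at ih ⊢
      rw [pvRender_cons]
      simp only [List.map_cons, List.zip_cons_cons, List.map_cons]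
      rw [← ih]
      simp

-- main B-side lemma
theorem runB (L : List String) (ls : List String) : ∀ (i : Nat) (f : Option String),
    L.drop i = ls → pvRender L (pvBnds f (i : Int) ls) = pvSpec f ls := by
  induction ls with
  | nil => intro i f _; simp only [pvBnds, pvSpec]; rfl
  | cons l ls ih =>
    intro i f hdrop
    unfold pvBnds
    cases h : pvBoundaryName f l with
    | none =>
      have : ((i : Int) + 1) = ((i + 1 : Nat) : Int) := by push_cast; ring
      rw [this, ih (i + 1) f (by rw [← List.drop_drop, hdrop]; rfl)]
      conv_rhs => rw [pvSpec]; rw [h]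
    | some n =>
      rw [pvRender_cons]
      have hdropi : L.drop i = l :: ls := hdrop
      have hlen : i + 1 + ls.length ≤ L.length := by
        have := congrArg List.length hdropi
        simp [List.length_drop] at this
        omega
      have htail : pvRender L (pvBnds (some n) ((i : Int) + 1) ls) = pvSpec (some n) ls := by
        have : ((i : Int) + 1) = ((i + 1 : Nat) : Int) := by push_cast; ring
        rw [this]
        exact ih (i + 1) (some n) (by rw [← List.drop_drop, hdrop]; rfl)
      have hsplit : (pvChop (some n) ls).1 ++ (pvChop (some n) ls).2 = ls := pvChop_append _ _
      have hslice : PySem.List.slice L (some (i : Int))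
          (some (match pvBnds (some n) ((i : Int) + 1) ls with
                 | [] => (L.length : Int) | (j, _) :: _ => j))
          = l :: (pvChop (some n) ls).1 := by
        cases hb : pvBnds (some n) ((i : Int) + 1) ls with
        | nil =>
          have hce : (pvChop (some n) ls).2 = [] := (pvBnds_nil_iff ls (some n) _).mp hb
          have hc1 : (pvChop (some n) ls).1 = ls := by
            rw [hce] at hsplit; simpa using hsplit
          rw [hc1]
          rw [PySem.List.slice_natCast, hdropi]
          apply List.take_of_length_le
          simp only [List.length_cons]
          omega
        | cons p rest =>
          have hh := pvBnds_head ls (some n) (i + 1)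
          have : ((i + 1 : Nat) : Int) = (i : Int) + 1 := by push_cast; ring
          rw [this, hb] at hh
          have hce : (pvChop (some n) ls).2.isEmpty = false := by
            cases hcc : (pvChop (some n) ls).2.isEmpty
            · rfl
            · rw [hcc] at hh; simp at hh
          rw [hce] at hh
          simp only [List.head?_cons, Option.map_some, if_false, Bool.false_eq_true] at hh
          have hp1 : p.1 = ((i + 1 + (pvChop (some n) ls).1.length : Nat) : Int) :=
            Option.some.inj hh
          simp only [hp1]
          rw [PySem.List.slice_natCast, hdropi]
          have harith : i + 1 + (pvChop (some n) ls).1.length - i = 1 + (pvChop (some n) ls).1.length := by omega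
          rw [harith]
          have : (1 + (pvChop (some n) ls).1.length) = (pvChop (some n) ls).1.length + 1 := by omega
          rw [this, List.take_succ_cons]
          congr 1
          have hfit := List.take_left' (l₁ := (pvChop (some n) ls).1)
            (l₂ := (pvChop (some n) ls).2) rfl
          rw [hsplit] at hfit
          exact hfit
      rw [hslice, htail]
      conv_rhs => rw [pvSpec]
      simp only [h]
      rw [pvSpec_chop]

-- ===== VERDICT (by name: the statement is the Claim_ definition above) =====
theorem SplitPatch_spec : Claim_equal_SplitPatch := by
  intro data _
  unfold Spec_SplitPatch SplitPatch SplitPatch_alt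
  have hstep : (fun (st : List (String × String) × Option String × List String) line =>
      let patches := st.1; let filename := st.2.1; let diff := st.2.2
      match pvRawName filename line with
      | some n =>
        if n ≠ "" then
          ((if pvTruthy filename && !diff.isEmpty then
              patches ++ [(filename.getD "", PySem.Str.join "" diff)]
            else patches), some n, [line])
        else (patches, filename, diff ++ [line])
      | none => (patches, filename, diff ++ [line])) = pvStepA :=
    funext fun st => funext fun line => stepA_eq st line
  rw [hstep]
  dsimp only
  rw [runA (pvLines data) none [] []]
  rw [foldB_eq (pvLines data) 0 [] none, List.nil_append, zip_ends_eq_render]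
  have hB := runB (pvLines data) (pvLines data) 0 none (by simp)
  simp only [Nat.cast_zero] at hB
  simp only [List.nil_append]
  rw [hB]
  rw [pvSpec_chop none (pvLines data)]
  simp [pvEmit, pvTruthy]
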